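-- pv_equiv track=rewrite | github.com/Leres1/e-olymp | 248.py | func
-- ===== SOURCE A (Python) =====
-- def func(n):
--     if n == 0:
--         return 1
--     if n == 1:
--         return 3
--     nums = 3
--     sums = 2
--     for i in range(1, n):
--         sums += 2
--         nums += sums
--     else:
--         return nums
-- ===== SOURCE B (Python) =====
-- def func(n):
--     # closed form of the quadratic sequence: 1, 3, 7, 13, ... = n^2 + n + 1
--     return n * n + n + 1
-- ===== Notes on version B (the rewrite author's own statement) =====
-- stated objective: faster
-- what changed: Replaced the linear accumulation loop by the sequence's closed-form quadratic polynomial, which also subsumes A's two special-cased base cases.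
-- outside the precondition, e.g. on func(-1): A returns 3, B returns 1
import Mathlib
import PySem

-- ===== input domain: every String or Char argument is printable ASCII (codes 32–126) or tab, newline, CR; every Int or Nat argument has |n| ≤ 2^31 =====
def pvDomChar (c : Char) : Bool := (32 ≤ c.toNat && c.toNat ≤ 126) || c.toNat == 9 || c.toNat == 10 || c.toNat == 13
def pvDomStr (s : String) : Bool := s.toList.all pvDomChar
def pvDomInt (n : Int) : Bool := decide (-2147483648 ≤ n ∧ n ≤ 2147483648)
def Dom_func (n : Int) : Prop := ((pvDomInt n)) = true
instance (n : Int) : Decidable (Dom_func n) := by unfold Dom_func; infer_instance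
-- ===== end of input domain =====

-- B replaces A's linear accumulation loop by the sequence's closed-form quadratic polynomial.


-- ===== PORT A =====
def func (n : Int) : Int :=
  if n == 0 then 1
  else if n == 1 then 3
  else
    -- nums = 3; sums = 2; for i in range(1, n): sums += 2; nums += sums
    let p := (PySem.List.pyRange 1 n 1).foldl
      (fun (st : Int × Int) _ => (st.1 + (st.2 + 2), st.2 + 2)) (3, 2)
    p.1

-- ===== PORT B =====
def func_alt (n : Int) : Int := n * n + n + 1

-- ===== PRECONDITION & SPEC =====
-- Pre_ restricts to the function's natural domain: the sequence is only defined
-- for nonnegative indices, and for negative n no value is specified (A returns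
-- its initial accumulator off an empty loop, B the polynomial's value there).
def Pre_func (n : Int) : Prop := 0 ≤ n
instance (n : Int) : Decidable (Pre_func n) := by unfold Pre_func; infer_instance
def pvWitness_func : Int := 5
def Spec_func (n : Int) (out : Int) : Prop := out = func_alt n
instance (n : Int) (out : Int) : Decidable (Spec_func n out) := by unfold Spec_func; infer_instance

-- ===== CLAIM (what is proved, stated in full; the proofs are below) =====
def Claim_equal_func : Prop := ∀ (n : Int), Dom_func n → Pre_func n → Spec_func n (func n)

-- ===== LEMMAS AND PROOFS =====

-- loop invariant: after the m iterations of range(1, 1+m), nums = (m+1)^2+(m+1)+1, sums = 2*(m+1)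
theorem func_loop (m : Nat) :
    (PySem.List.pyRange 1 (1 + (m : Int)) 1).foldl
      (fun (st : Int × Int) _ => (st.1 + (st.2 + 2), st.2 + 2)) (3, 2)
    = (((m : Int) + 1) * ((m : Int) + 1) + ((m : Int) + 1) + 1, 2 * ((m : Int) + 1)) := by
  induction m with
  | zero => simp [PySem.List.pyRange_one_eq_nil]
  | succ k ih =>
      have h : (1 : Int) ≤ 1 + (k : Int) := by omega
      have : (1 : Int) + ((k + 1 : Nat) : Int) = (1 + (k : Int)) + 1 := by push_cast; ring
      rw [this, PySem.List.pyRange_one_succ_right h, List.foldl_append, ih]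
      simp only [List.foldl_cons, List.foldl_nil]
      rw [Prod.mk.injEq]
      constructor <;> (push_cast; ring)

theorem func_spec : Claim_equal_func := by
  intro n _ hpre
  unfold Spec_func func func_alt
  by_cases h0 : n = 0
  · simp [h0]
  · by_cases h1 : n = 1
    · simp [h1]
    · obtain ⟨m, hm⟩ : ∃ m : Nat, n = 1 + (m : Int) := ⟨(n - 1).toNat, by unfold Pre_func at hpre; omega⟩
      rw [hm]
      simp only [beq_iff_eq, hm] at h0 h1 ⊢
      rw [if_neg h0, if_neg h1, func_loop]
      ring
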